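-- pv_equiv track=rewrite | github.com/tato-mchedlidze/GOA | day096/homework/homeowrk.py | flick_switch
-- ===== SOURCE A (Python) =====
-- def flick_switch(lst):
--     result = []
--     bool = True
--
--     for item in lst:
--         if item == 'flick':
--             bool = not bool
--
--         result.append(bool)
--
--     return result
-- ===== SOURCE B (Python) =====
-- def flick_switch(lst):
--     # Phase 1: running count of 'flick' occurrences at each position.
--     counts = []
--     c = 0
--     for x in lst:
--         c += (x == 'flick')
--         counts.append(c)
--     # Phase 2: state is True exactly when an even number of flicks occurred.
--     return [c % 2 == 0 for c in counts]
-- ===== Notes on version B (the rewrite author's own statement) =====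
-- stated objective: alternative
-- what changed: B maintains an integer prefix count of 'flick' occurrences and then maps each count to its parity, instead of toggling a boolean while appending it.
import Mathlib
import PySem

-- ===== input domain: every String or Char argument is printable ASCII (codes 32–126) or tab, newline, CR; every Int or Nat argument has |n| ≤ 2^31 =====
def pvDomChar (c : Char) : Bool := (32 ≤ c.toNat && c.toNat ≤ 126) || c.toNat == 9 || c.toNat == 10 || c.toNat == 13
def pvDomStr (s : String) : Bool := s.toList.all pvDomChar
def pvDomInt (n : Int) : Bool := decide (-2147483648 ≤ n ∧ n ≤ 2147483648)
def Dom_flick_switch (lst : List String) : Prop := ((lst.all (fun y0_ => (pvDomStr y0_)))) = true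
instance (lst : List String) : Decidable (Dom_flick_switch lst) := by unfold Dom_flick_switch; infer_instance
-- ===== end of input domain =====

-- B maintains a prefix count of 'flick' occurrences then maps counts to parity; A toggles a boolean.

-- ===== PORT A =====
def flick_switch (lst : List String) : List Bool :=
  (lst.foldl (fun (st : List Bool × Bool) item =>
      let b := if item == "flick" then !st.2 else st.2
      (st.1 ++ [b], b)) ([], true)).1

-- ===== PORT B =====
-- Phase 1: running count of 'flick' occurrences at each position.
def pvCounts (lst : List String) : List Nat :=
  (lst.foldl (fun (st : List Nat × Nat) x =>
      let c := st.2 + (if x == "flick" then 1 else 0)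
      (st.1 ++ [c], c)) ([], 0)).1

-- Phase 2: state is True exactly when an even number of flicks occurred.
def flick_switch_alt (lst : List String) : List Bool :=
  (pvCounts lst).map (fun c => c % 2 == 0)

-- ===== PRECONDITION & SPEC =====
def Spec_flick_switch (lst : List String) (out : List Bool) : Prop := out = flick_switch_alt lst
instance (lst : List String) (out : List Bool) : Decidable (Spec_flick_switch lst out) := by unfold Spec_flick_switch; infer_instance

-- ===== CLAIM =====
def Claim_equal_flick_switch : Prop := ∀ (lst : List String), Dom_flick_switch lst → Spec_flick_switch lst (flick_switch lst)

-- ===== LEMMAS AND PROOFS =====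
theorem pv_inv (lst : List String) :
    ∀ (acc1 : List Bool) (b : Bool) (acc2 : List Nat) (c : Nat),
      b = (c % 2 == 0) → acc1 = acc2.map (fun c => c % 2 == 0) →
      (lst.foldl (fun (st : List Bool × Bool) item =>
          let b := if item == "flick" then !st.2 else st.2
          (st.1 ++ [b], b)) (acc1, b)).1
      = ((lst.foldl (fun (st : List Nat × Nat) x =>
          let c := st.2 + (if x == "flick" then 1 else 0)
          (st.1 ++ [c], c)) (acc2, c)).1).map (fun c => c % 2 == 0) := by
  induction lst with
  | nil => intro acc1 b acc2 c hb ha; simp [List.foldl, ha]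
  | cons x xs ih =>
    intro acc1 b acc2 c hb ha
    simp only [List.foldl]
    by_cases hx : x == "flick"
    · simp only [hx, if_pos]
      refine ih _ _ _ _ ?_ ?_
      · subst hb
        rcases Nat.mod_two_eq_zero_or_one c with h | h <;> simp [Nat.add_mod, h]
      · subst hb ha
        rcases Nat.mod_two_eq_zero_or_one c with h | h <;> simp [Nat.add_mod, h]
    · simp only [hx]
      refine ih _ _ _ _ ?_ ?_
      · simpa using hb
      · subst hb ha; simp
  
-- ===== VERDICT =====
theorem flick_switch_spec : Claim_equal_flick_switch := by
  intro lst _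
  unfold Spec_flick_switch flick_switch flick_switch_alt pvCounts
  exact pv_inv lst [] true [] 0 (by decide) (by simp)
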